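-- pv_equiv track=rewrite | github.com/nicholaswlee/python_practice | notes/strings.py | determine_lowest_word
-- ===== SOURCE A (Python) =====
-- def determine_lowest_word(words):
--     word = None
--     for w in words:
--         if(word == None):
--             word = w
--         if(word > w):
--             word = w
--     return word
-- ===== SOURCE B (Python) =====
-- def determine_lowest_word(words):
--     s = sorted(words)
--     return s[0] if s else None
-- ===== Notes on version B (the rewrite author's own statement) =====
-- stated objective: idiomatic
-- what changed: replaced A's single-pass min-scan with a None accumulator by sort-then-take-front (sorted(words)[0], None if empty)
import Mathlib
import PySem

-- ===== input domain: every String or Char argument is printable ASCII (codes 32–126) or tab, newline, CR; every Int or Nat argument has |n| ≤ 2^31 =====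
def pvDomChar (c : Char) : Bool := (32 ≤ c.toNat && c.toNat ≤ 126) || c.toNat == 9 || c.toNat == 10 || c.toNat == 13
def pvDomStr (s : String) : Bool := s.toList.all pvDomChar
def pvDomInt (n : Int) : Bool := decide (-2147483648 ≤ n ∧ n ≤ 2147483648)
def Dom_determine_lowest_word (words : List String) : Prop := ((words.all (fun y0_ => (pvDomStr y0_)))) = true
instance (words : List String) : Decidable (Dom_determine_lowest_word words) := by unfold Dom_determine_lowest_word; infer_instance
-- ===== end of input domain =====

-- B sorts the list and takes its front instead of A's single-pass min-scan with a None accumulator (idiomatic rewrite; return value only).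

-- ===== PORT A =====
-- A's loop body: first replace a None accumulator by the current word, then replace it if it is greater.
def determine_lowest_word (words : List String) : Option String :=
  words.foldl (fun word w =>
    let word := match word with
      | none => some w
      | some v => some v
    match word with
    | some v => if v > w then some w else some v
    | none => none) none

-- ===== PORT B =====
def determine_lowest_word_alt (words : List String) : Option String :=
  (PySem.List.sorted words (fun x => x) false).head?

-- ===== PRECONDITION & SPEC =====
def Spec_determine_lowest_word (words : List String) (out : Option String) : Prop := out = determine_lowest_word_alt words
instance (words : List String) (out : Option String) : Decidable (Spec_determine_lowest_word words out) := by unfold Spec_determine_lowest_word; infer_instance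

-- ===== CLAIM (what is proved, stated in full; the proofs are below) =====
def Claim_equal_determine_lowest_word : Prop := ∀ (words : List String), Dom_determine_lowest_word words → Spec_determine_lowest_word words (determine_lowest_word words)

-- ===== LEMMAS AND PROOFS =====

-- A's fold, started from `some v`, returns the minimum of v and the remaining words.
theorem foldA_some (ws : List String) (v : String) :
    ∃ u, ws.foldl (fun word w =>
      let word := match word with
        | none => some w
        | some v => some v
      match word with
      | some v => if v > w then some w else some v
      | none => none) (some v) = some u ∧ (u = v ∨ u ∈ ws) ∧ u ≤ v ∧ ∀ y ∈ ws, u ≤ y := by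
  induction ws generalizing v with
  | nil => exact ⟨v, rfl, Or.inl rfl, le_refl v, by simp⟩
  | cons w t ih =>
    simp only [List.foldl]
    by_cases h : v > w
    · simp only [h, if_true]
      obtain ⟨u, heq, hmem, hle, hall⟩ := ih w
      refine ⟨u, heq, ?_, ?_, ?_⟩
      · rcases hmem with h1 | h1
        · exact Or.inr (by simp [h1])
        · exact Or.inr (by simp [h1])
      · exact le_of_lt (lt_of_le_of_lt hle h)
      · intro y hy
        rcases List.mem_cons.mp hy with h1 | h1
        · exact h1 ▸ hle
        · exact hall y h1
    · simp only [h, if_false]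
      obtain ⟨u, heq, hmem, hle, hall⟩ := ih v
      refine ⟨u, heq, ?_, hle, ?_⟩
      · rcases hmem with h1 | h1
        · exact Or.inl h1
        · exact Or.inr (List.mem_cons_of_mem _ h1)
      · intro y hy
        rcases List.mem_cons.mp hy with h1 | h1
        · exact h1 ▸ le_trans hle (not_lt.mp h)
        · exact hall y h1

theorem determine_lowest_word_spec' (words : List String) :
    determine_lowest_word words = determine_lowest_word_alt words := by
  cases words with
  | nil =>
    simp [determine_lowest_word, determine_lowest_word_alt, PySem.List.sorted]
  | cons w t =>
    unfold determine_lowest_word determine_lowest_word_alt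
    simp only [List.foldl]
    have hstep : (if w > w then some w else some w) = some w := by simp
    rw [hstep]
    obtain ⟨u, heq, hmem, hle, hall⟩ := foldA_some t w
    rw [heq]
    cases hs : PySem.List.sorted (w :: t) (fun x => x) false with
    | nil => exact absurd hs (by simp [PySem.List.sorted_eq_nil_iff])
    | cons m t' =>
      have hm : m ∈ w :: t := (PySem.List.mem_sorted _ _ _ _).mp (hs ▸ List.mem_cons_self)
      have hmle : ∀ y ∈ w :: t, m ≤ y := PySem.List.key_head_sorted_le _ (fun x => x) hs
      have h1 : u ≤ m := by
        rcases List.mem_cons.mp hm with h | h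
        · exact h ▸ hle
        · exact hall m h
      have h2 : m ≤ u := by
        rcases hmem with h | h
        · exact h ▸ hmle w List.mem_cons_self
        · exact hmle u (List.mem_cons_of_mem _ h)
      simp [le_antisymm h1 h2]

-- ===== VERDICT (by name: the statement is the Claim_ definition above) =====
theorem determine_lowest_word_spec : Claim_equal_determine_lowest_word := by
  intro words _
  exact determine_lowest_word_spec' words
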